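-- pv_equiv track=rewrite | github.com/david-a-spellman/MRM-extraction-research-code | OldCreateContrastivePairsVersion.py | getRegulationVerb
-- ===== SOURCE A (Python) =====
-- vowels = ['a', 'e', 'i', 'o', 'u', 'y']
--
-- def normalize_verb (verb):
-- 	if len (verb) < 3:
-- 		return verb
-- 	if verb [-3:len (verb)] == "ies" or verb [-3:len (verb)] == "ing":
-- 		verb = verb [0:-3]
-- 	elif verb [-2:len (verb)] == "ed" or verb [-2:len (verb)] == "es":
-- 		verb = verb [0:-2]
-- 	elif verb [-1] == "y" or verb [-1] == "e":
-- 		verb = verb [0:-1]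
-- 	elif verb [-1] == "s" and (not verb [-2] in vowels) and (verb [-2] != "s"):
-- 		verb = verb [0:-1]
-- 	return verb
--
-- def getRegulationVerb (verbs, tokens):
-- 	indicies = list ()
-- 	for verb in verbs:
-- 		for token in tokens:
-- 			if normalize_verb (token).lower () == normalize_verb (verb).lower ():
-- 				indicies.append (tokens.index (token))
-- 	indicies = sorted (indicies)
-- 	for i in range (0, len (indicies)):
-- 		index = indicies [i]
-- 		if (tokens [index] [-2:len (tokens [index])] != "ed") and (tokens [index] [-3:len (tokens [index])] != "ing"):
-- 			return tokens [indicies [i]], indicies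
-- 	if len (indicies) == 0:
-- 		print (tokens)
-- 		return None, indicies
-- 	return tokens [indicies [0]], indicies
-- ===== SOURCE B (Python) =====
-- vowels = ['a', 'e', 'i', 'o', 'u', 'y']
--
-- def _normalize(v):
--     if len(v) >= 3:
--         if v.endswith("ies") or v.endswith("ing"):
--             return v[:-3]
--         if v.endswith("ed") or v.endswith("es"):
--             return v[:-2]
--         if v[-1] in "ye":
--             return v[:-1]
--         if v.endswith("s") and v[-2] not in "aeiouys":
--             return v[:-1]
--     return v
--
-- def getRegulationVerb(verbs, tokens):
--     first = {}
--     for i, tok in enumerate(tokens):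
--         first.setdefault(tok, i)
--     groups = {}
--     for tok in tokens:
--         groups.setdefault(_normalize(tok).lower(), []).append(first[tok])
--     indices = []
--     for v in verbs:
--         indices.extend(groups.get(_normalize(v).lower(), []))
--     indices.sort()
--     for idx in indices:
--         t = tokens[idx]
--         if not t.endswith("ed") and not t.endswith("ing"):
--             return t, indices
--     if not indices:
--         print(tokens)
--         return None, indices
--     return tokens[indices[0]], indices
-- ===== Notes on version B (the rewrite author's own statement) =====
-- stated objective: faster
-- what changed: B normalizes every token once, builds a first-index dict and a dict grouping first indices by normalized key in one pass, then answers each verb by a single dict lookup, instead of A's per-(verb,token) re-normalization with an O(T) tokens.index scan on every match.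
import Mathlib
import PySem

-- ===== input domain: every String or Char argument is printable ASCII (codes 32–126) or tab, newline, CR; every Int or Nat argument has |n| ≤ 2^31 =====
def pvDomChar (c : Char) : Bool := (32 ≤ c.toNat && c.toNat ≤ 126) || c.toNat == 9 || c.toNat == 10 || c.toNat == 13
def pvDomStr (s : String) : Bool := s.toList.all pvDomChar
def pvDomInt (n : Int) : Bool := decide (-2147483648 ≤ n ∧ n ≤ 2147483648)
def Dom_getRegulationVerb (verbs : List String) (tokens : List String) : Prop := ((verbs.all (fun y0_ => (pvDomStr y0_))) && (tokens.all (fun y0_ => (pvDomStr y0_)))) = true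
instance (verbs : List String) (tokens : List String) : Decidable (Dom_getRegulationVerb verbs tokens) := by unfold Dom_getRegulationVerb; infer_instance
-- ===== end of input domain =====

-- B replaces A's per-(verb,token) re-normalization with an O(T) tokens.index scan on every match
-- by one normalization pass over tokens, a first-index dict and a grouping dict, then one dict
-- lookup per verb; A's `print(tokens)` on the no-match path is a side effect not modelled here.

-- ===== PORT A =====
def pvVowelsA : List Char := ['a', 'e', 'i', 'o', 'u', 'y']

-- normalize_verb, transliterated: slices verb[-3:len(verb)], verb[0:-3], …; verb[-1]/verb[-2]
-- ported with pyGet? (always in range in the branches that read them, since len ≥ 3 there).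
def pvNormA (cs : List Char) : List Char :=
  if cs.length < 3 then cs
  else if PySem.List.slice cs (some (-3)) (some (cs.length : Int)) = ['i','e','s']
        ∨ PySem.List.slice cs (some (-3)) (some (cs.length : Int)) = ['i','n','g'] then
    PySem.List.slice cs (some 0) (some (-3))
  else if PySem.List.slice cs (some (-2)) (some (cs.length : Int)) = ['e','d']
        ∨ PySem.List.slice cs (some (-2)) (some (cs.length : Int)) = ['e','s'] then
    PySem.List.slice cs (some 0) (some (-2))
  else if PySem.List.pyGet? cs (-1) = some 'y' ∨ PySem.List.pyGet? cs (-1) = some 'e' then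
    PySem.List.slice cs (some 0) (some (-1))
  else if PySem.List.pyGet? cs (-1) = some 's'
        ∧ ¬ pvVowelsA.contains ((PySem.List.pyGet? cs (-2)).getD ' ')
        ∧ (PySem.List.pyGet? cs (-2)).getD ' ' ≠ 's' then
    PySem.List.slice cs (some 0) (some (-1))
  else cs

-- normalize_verb(s).lower()
def pvKeyA (s : String) : List Char := PySem.Chars.lower (pvNormA s.toList)

-- the `for i in range(0, len(indicies))` early-return loop; tokens[index] ported with pyGet?
-- (the indices come from tokens.index, so always in range; the getD "" default is never read)
def pvScanA (tokens : List String) (ind : List Int) : List Int → Option (Option String × List Int)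
  | [] => none
  | idx :: rest =>
    let tok := (PySem.List.pyGet? tokens idx).getD ""
    if PySem.List.slice tok.toList (some (-2)) (some (tok.toList.length : Int)) ≠ ['e','d']
       ∧ PySem.List.slice tok.toList (some (-3)) (some (tok.toList.length : Int)) ≠ ['i','n','g']
    then some (some tok, ind)
    else pvScanA tokens ind rest

def getRegulationVerb (verbs : List String) (tokens : List String) : Option String × List Int :=
  let ind0 := verbs.foldl (fun acc verb =>
      tokens.foldl (fun acc token =>
        if pvKeyA token = pvKeyA verb
        -- tokens.index(token): token ∈ tokens, so index? is never none
        then acc ++ [(((PySem.List.index? tokens token).getD 0 : Nat) : Int)]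
        else acc) acc) []
  let ind := PySem.List.sorted ind0 (fun x => x) false
  match pvScanA tokens ind ind with
  | some r => r
  | none =>
    if ind.length = 0 then (none, ind)
    else (some ((PySem.List.pyGet? tokens ((PySem.List.pyGet? ind 0).getD 0)).getD ""), ind)

-- ===== PORT B =====
-- _normalize from Source B (endswith / character-membership phrasing)
def pvNormB (cs : List Char) : List Char :=
  if 3 ≤ cs.length then
    if PySem.Chars.endswith cs ['i','e','s'] || PySem.Chars.endswith cs ['i','n','g'] then
      PySem.List.slice cs none (some (-3))
    else if PySem.Chars.endswith cs ['e','d'] || PySem.Chars.endswith cs ['e','s'] then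
      PySem.List.slice cs none (some (-2))
    else if ['y','e'].contains ((PySem.List.pyGet? cs (-1)).getD ' ') then
      PySem.List.slice cs none (some (-1))
    else if PySem.Chars.endswith cs ['s']
         && !(['a','e','i','o','u','y','s'].contains ((PySem.List.pyGet? cs (-2)).getD ' ')) then
      PySem.List.slice cs none (some (-1))
    else cs
  else cs

def pvKeyB (s : String) : List Char := PySem.Chars.lower (pvNormB s.toList)

-- first = {}; for i, tok in enumerate(tokens): first.setdefault(tok, i)
def pvFirstB (tokens : List String) : PySem.Dict String Int :=
  (PySem.List.enumerate tokens 0).foldl (fun d p => d.setdefault p.2 p.1) PySem.Dict.empty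

-- the final early-return loop of Source B
def pvScanB (tokens : List String) (ind : List Int) : List Int → Option (Option String × List Int)
  | [] => none
  | idx :: rest =>
    let tok := (PySem.List.pyGet? tokens idx).getD ""
    if !PySem.Chars.endswith tok.toList ['e','d'] && !PySem.Chars.endswith tok.toList ['i','n','g']
    then some (some tok, ind)
    else pvScanB tokens ind rest

def getRegulationVerb_alt (verbs : List String) (tokens : List String) : Option String × List Int :=
  let first := pvFirstB tokens
  -- groups.setdefault(key, []).append(first[tok])  ==  modify key [] (· ++ [first[tok]])
  let groups := tokens.foldl
      (fun d t => d.modify (pvKeyB t) [] (· ++ [first.getD t 0])) PySem.Dict.empty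
  let ind0 := verbs.foldl (fun acc v => acc ++ groups.getD (pvKeyB v) []) []
  let ind := PySem.List.sorted ind0 (fun x => x) false
  match pvScanB tokens ind ind with
  | some r => r
  | none =>
    match ind with
    | [] => (none, ind)
    | i :: _ => (some ((PySem.List.pyGet? tokens i).getD ""), ind)

-- ===== PRECONDITION & SPEC =====
def Spec_getRegulationVerb (verbs : List String) (tokens : List String) (out : Option String × List Int) : Prop := out = getRegulationVerb_alt verbs tokens
instance (verbs : List String) (tokens : List String) (out : Option String × List Int) : Decidable (Spec_getRegulationVerb verbs tokens out) := by unfold Spec_getRegulationVerb; infer_instance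

-- ===== CLAIM (what is proved, stated in full; the proofs are below) =====
def Claim_equal_getRegulationVerb : Prop := ∀ (verbs : List String) (tokens : List String), Dom_getRegulationVerb verbs tokens → Spec_getRegulationVerb verbs tokens (getRegulationVerb verbs tokens)

-- ===== LEMMAS AND PROOFS =====

-- xs[-k:len(xs)] is the length-k suffix (clamped to the whole list when k > len)
theorem pvSliceNegLen (cs : List Char) (k : Nat) (hk : 0 < k) :
    PySem.List.slice cs (some (-(k:Int))) (some (cs.length : Int)) = cs.drop (cs.length - k) := by
  simp only [PySem.List.slice, PySem.List.clampIdx]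
  have hkneg : (-(k:Int)) < 0 := by omega
  rw [if_pos hkneg]
  have hlen : ¬ ((cs.length : Int) < 0) := by omega
  rw [if_neg hlen]
  by_cases h : (cs.length : Int) + -(k:Int) < 0
  · rw [if_pos h]
    have : cs.length - k = 0 := by omega
    rw [this]
    simp
  · rw [if_neg h]
    have h2 : ((cs.length : Int) + -(k:Int)).toNat = cs.length - k := by omega
    rw [h2]
    simp

theorem pvDropEqIffEndswith (cs pat : List Char) :
    (cs.drop (cs.length - pat.length) = pat) ↔ PySem.Chars.endswith cs pat = true := by
  rw [PySem.Chars.endswith_iff, List.suffix_iff_eq_drop, eq_comm]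

theorem pvTwoTail (cs : List Char) (h : 2 ≤ cs.length) : ∃ ds a b, cs = ds ++ [a, b] := by
  rcases hr : cs.reverse with _ | ⟨z, _ | ⟨y, rest⟩⟩
  · simp_all
  · apply_fun List.length at hr; simp at hr; omega
  · exact ⟨rest.reverse, y, z, by have := congrArg List.reverse hr; simpa using this⟩

theorem pvNorm_eq (cs : List Char) : pvNormB cs = pvNormA cs := by
  unfold pvNormA pvNormB
  by_cases h3 : cs.length < 3
  · rw [if_pos h3, if_neg (by omega)]
  · rw [if_neg h3, if_pos (by omega)]
    obtain ⟨ds, a, b, rfl⟩ := pvTwoTail cs (by omega)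
    have hlen : (ds ++ [a, b]).length = ds.length + 2 := by simp
    have hassoc : ds ++ [a, b] = (ds ++ [a]) ++ [b] := by simp
    have hb1 : PySem.List.pyGet? (ds ++ [a, b]) (-1) = some b := by
      rw [hassoc]; exact PySem.List.pyGet?_neg_one_append_singleton _ _
    have ha2 : PySem.List.pyGet? (ds ++ [a, b]) (-2) = some a := by
      rw [PySem.List.pyGet?_neg_ofNat _ 2 (by omega) (by simp), hlen]
      simp
    have hd1 : (ds ++ [a, b]).drop ((ds ++ [a, b]).length - 1) = [b] := by
      rw [hlen, List.drop_append]; simp [List.drop_of_length_le (by omega : ds.length ≤ ds.length + 1)]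
    have e1 : ((PySem.Chars.endswith (ds ++ [a, b]) ['i','e','s'] || PySem.Chars.endswith (ds ++ [a, b]) ['i','n','g']) = true)
        ↔ (PySem.List.slice (ds ++ [a, b]) (some (-3)) (some ((ds ++ [a, b]).length : Int)) = ['i','e','s']
          ∨ PySem.List.slice (ds ++ [a, b]) (some (-3)) (some ((ds ++ [a, b]).length : Int)) = ['i','n','g']) := by
      rw [show (-3 : Int) = -((3:Nat):Int) by norm_num, pvSliceNegLen _ 3 (by omega)]
      rw [Bool.or_eq_true, ← pvDropEqIffEndswith, ← pvDropEqIffEndswith]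
      norm_num
    have e2 : ((PySem.Chars.endswith (ds ++ [a, b]) ['e','d'] || PySem.Chars.endswith (ds ++ [a, b]) ['e','s']) = true)
        ↔ (PySem.List.slice (ds ++ [a, b]) (some (-2)) (some ((ds ++ [a, b]).length : Int)) = ['e','d']
          ∨ PySem.List.slice (ds ++ [a, b]) (some (-2)) (some ((ds ++ [a, b]).length : Int)) = ['e','s']) := by
      rw [show (-2 : Int) = -((2:Nat):Int) by norm_num, pvSliceNegLen _ 2 (by omega)]
      rw [Bool.or_eq_true, ← pvDropEqIffEndswith, ← pvDropEqIffEndswith]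
      norm_num
    have e3 : (['y','e'].contains ((PySem.List.pyGet? (ds ++ [a, b]) (-1)).getD ' ') = true)
        ↔ (PySem.List.pyGet? (ds ++ [a, b]) (-1) = some 'y' ∨ PySem.List.pyGet? (ds ++ [a, b]) (-1) = some 'e') := by
      rw [hb1]; simp
    have e4 : ((PySem.Chars.endswith (ds ++ [a, b]) ['s']
         && !(['a','e','i','o','u','y','s'].contains ((PySem.List.pyGet? (ds ++ [a, b]) (-2)).getD ' '))) = true)
        ↔ (PySem.List.pyGet? (ds ++ [a, b]) (-1) = some 's'
          ∧ ¬ pvVowelsA.contains ((PySem.List.pyGet? (ds ++ [a, b]) (-2)).getD ' ')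
          ∧ (PySem.List.pyGet? (ds ++ [a, b]) (-2)).getD ' ' ≠ 's') := by
      rw [hb1, ha2, Bool.and_eq_true, ← pvDropEqIffEndswith]
      norm_num [hd1, pvVowelsA]
      tauto
    rw [if_congr e1 (PySem.List.slice_zero_start _ _).symm
        (if_congr e2 (PySem.List.slice_zero_start _ _).symm
          (if_congr e3 (PySem.List.slice_zero_start _ _).symm
            (if_congr e4 (PySem.List.slice_zero_start _ _).symm rfl)))]

theorem pvKey_eq : pvKeyB = pvKeyA := by
  funext s; simp [pvKeyB, pvKeyA, pvNorm_eq]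

theorem pvScanCond (t : List Char) :
    ((!PySem.Chars.endswith t ['e','d'] && !PySem.Chars.endswith t ['i','n','g']) = true)
    ↔ (PySem.List.slice t (some (-2)) (some (t.length : Int)) ≠ ['e','d']
      ∧ PySem.List.slice t (some (-3)) (some (t.length : Int)) ≠ ['i','n','g']) := by
  rw [show (-2 : Int) = -((2:Nat):Int) by norm_num, pvSliceNegLen _ 2 (by omega),
      show (-3 : Int) = -((3:Nat):Int) by norm_num, pvSliceNegLen _ 3 (by omega)]
  rw [Bool.and_eq_true, Bool.not_eq_true', Bool.not_eq_true',
      ← Bool.not_eq_true, ← Bool.not_eq_true, ← pvDropEqIffEndswith, ← pvDropEqIffEndswith]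
  norm_num

theorem pvScan_eq (tokens : List String) (ind : List Int) (l : List Int) :
    pvScanB tokens ind l = pvScanA tokens ind l := by
  induction l with
  | nil => rfl
  | cons idx rest ih =>
    simp only [pvScanA, pvScanB]
    rw [if_congr (pvScanCond _) rfl ih]

-- the first-occurrence dict holds exactly tokens.index
theorem pvFirst_get? (tokens : List String) (t : String) :
    (pvFirstB tokens).get? t = (PySem.List.index? tokens t).map (fun n => (n : Int)) := by
  induction tokens using List.reverseRecOn with
  | nil => simp [pvFirstB]
  | append_singleton xs x ih =>
    have hstep : pvFirstB (xs ++ [x]) = (pvFirstB xs).setdefault x (xs.length : Int) := by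
      simp [pvFirstB, PySem.List.enumerate_append, List.foldl_append]
    rw [hstep]
    by_cases hx : t = x
    · subst hx
      rw [PySem.Dict.get?_setdefault_self, ih]
      by_cases hmem : t ∈ xs
      · rw [PySem.List.index?_append_of_mem _ hmem]
        rcases Option.isSome_iff_exists.mp ((PySem.List.index?_isSome_iff xs t).mpr hmem) with ⟨n, hn⟩
        rw [PySem.List.index?_eq_idxOf?] at hn
        simp [hn]
      · rw [PySem.List.index?_append_singleton_self _ _ hmem]
        have h0 : PySem.List.index? xs t = none := (PySem.List.index?_eq_none_iff xs t).mpr hmem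
        rw [PySem.List.index?_eq_idxOf?] at h0
        simp [h0]
    · rw [PySem.Dict.get?_setdefault_of_ne _ _ hx, ih]
      by_cases hmem : t ∈ xs
      · rw [PySem.List.index?_append_of_mem _ hmem]
      · have h1 : PySem.List.index? xs t = none := (PySem.List.index?_eq_none_iff xs t).mpr hmem
        have h2 : PySem.List.index? (xs ++ [x]) t = none := by
          rw [PySem.List.index?_eq_none_iff]; simp [hmem, hx]
        rw [h1, h2]

-- A's nested collection loop produces exactly B's per-verb group lookups
theorem pvInd0_eq (verbs tokens : List String) :
    verbs.foldl (fun acc verb =>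
      tokens.foldl (fun acc token =>
        if pvKeyA token = pvKeyA verb
        then acc ++ [(((PySem.List.index? tokens token).getD 0 : Nat) : Int)]
        else acc) acc) []
    = verbs.foldl (fun acc v => acc ++
        (tokens.foldl (fun d t => d.modify (pvKeyB t) [] (· ++ [(pvFirstB tokens).getD t 0]))
          PySem.Dict.empty).getD (pvKeyB v) []) [] := by
  have hGroups : ∀ c, (tokens.foldl (fun d t => d.modify (pvKeyB t) [] (· ++ [(pvFirstB tokens).getD t 0]))
          PySem.Dict.empty).getD c []
      = (tokens.filter (fun t => pvKeyB t == c)).map (fun t => (pvFirstB tokens).getD t 0) := by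
    intro c
    rw [show (tokens.foldl (fun d t => d.modify (pvKeyB t) [] (· ++ [(pvFirstB tokens).getD t 0]))
          PySem.Dict.empty)
        = ((tokens.map (fun t => (pvKeyB t, (pvFirstB tokens).getD t 0))).foldl
            (fun d p => d.modify p.1 [] (· ++ [p.2])) PySem.Dict.empty) from by rw [List.foldl_map]]
    rw [PySem.Dict.getD_foldl_modify_append]
    simp [List.filter_map, List.map_map, Function.comp_def]
  have hf : ∀ t ∈ tokens, (pvFirstB tokens).getD t 0 = (((PySem.List.index? tokens t).getD 0 : Nat) : Int) := by
    intro t ht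
    rw [PySem.Dict.getD_eq_get?_getD, pvFirst_get?]
    rcases Option.isSome_iff_exists.mp ((PySem.List.index?_isSome_iff tokens t).mpr ht) with ⟨n, hn⟩
    rw [PySem.List.index?_eq_idxOf?] at hn
    simp [hn]
  have hfun : ∀ (acc : List Int) (v : String),
      tokens.foldl (fun acc token =>
        if pvKeyA token = pvKeyA v
        then acc ++ [(((PySem.List.index? tokens token).getD 0 : Nat) : Int)]
        else acc) acc
      = acc ++ (tokens.foldl (fun d t => d.modify (pvKeyB t) [] (· ++ [(pvFirstB tokens).getD t 0]))
          PySem.Dict.empty).getD (pvKeyB v) [] := by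
    intro acc v
    rw [hGroups]
    have hbe : (fun (acc : List Int) token =>
        if pvKeyA token = pvKeyA v
        then acc ++ [(((PySem.List.index? tokens token).getD 0 : Nat) : Int)]
        else acc)
      = (fun (acc : List Int) token =>
        if (pvKeyA token == pvKeyA v) = true
        then acc ++ [(((PySem.List.index? tokens token).getD 0 : Nat) : Int)]
        else acc) := by
      funext acc t; simp
    rw [hbe, PySem.List.foldl_append_if]
    congr 1
    rw [pvKey_eq]
    exact (List.map_congr_left (fun t ht => (hf t (List.mem_of_mem_filter ht)).symm))
  exact PySem.List.foldl_congr_mem' _ _ _ _ (fun v _ acc => hfun acc v)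

-- A's tail (early-return scan, then the length-0 / head branch) equals B's tail on any list
theorem pvTail_eq (tokens : List String) (S : List Int) :
    (match pvScanA tokens S S with
     | some r => r
     | none =>
       if S.length = 0 then (none, S)
       else (some ((PySem.List.pyGet? tokens ((PySem.List.pyGet? S 0).getD 0)).getD ""), S))
    = (match pvScanA tokens S S with
       | some r => r
       | none =>
         match S with
         | [] => (none, S)
         | i :: _ => (some ((PySem.List.pyGet? tokens i).getD ""), S)) := by
  cases hscan : pvScanA tokens S S with
  | some r => rfl
  | none =>
    cases S with
    | nil => rfl
    | cons i rest => simp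

-- ===== VERDICT (by name: the statement is the Claim_ definition above) =====
theorem getRegulationVerb_spec : Claim_equal_getRegulationVerb := by
  intro verbs tokens _
  show getRegulationVerb verbs tokens = getRegulationVerb_alt verbs tokens
  simp only [getRegulationVerb, getRegulationVerb_alt]
  rw [pvInd0_eq, pvScan_eq]
  exact pvTail_eq tokens _
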